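-- pv_equiv track=rewrite | github.com/jemtca/CodingBat | Python/String-3/max_block.py | max_block
-- ===== SOURCE A (Python) =====
-- def max_block(str):
--     temp = 0
--
--     if not str:
--         max = 0
--     else:
--         max = 1
--
--     for x in range(len(str)-1):
--         if str[x] == str[x+1]:
--             temp += 1
--             j = x
--             while(j < len(str)-1 and str[x] == str[j+1]):
--                 temp += 1
--                 j += 1
--             if temp > max:
--                 max = temp
--             temp = 0
--
--     return max
-- ===== SOURCE B (Python) =====
-- def max_block(str):
--     # single left-to-right pass tracking the current run length and the best seen
--     prev = None
--     cur = 0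
--     best = 0
--     for ch in str:
--         cur = cur + 1 if ch == prev else 1
--         if cur > best:
--             best = cur
--         prev = ch
--     return best
-- ===== Notes on version B (the rewrite author's own statement) =====
-- stated objective: faster
-- what changed: Replaces the index loop with a quadratic rescanning inner while-loop by a single pass that tracks the current run length and the maximum.
import Mathlib
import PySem

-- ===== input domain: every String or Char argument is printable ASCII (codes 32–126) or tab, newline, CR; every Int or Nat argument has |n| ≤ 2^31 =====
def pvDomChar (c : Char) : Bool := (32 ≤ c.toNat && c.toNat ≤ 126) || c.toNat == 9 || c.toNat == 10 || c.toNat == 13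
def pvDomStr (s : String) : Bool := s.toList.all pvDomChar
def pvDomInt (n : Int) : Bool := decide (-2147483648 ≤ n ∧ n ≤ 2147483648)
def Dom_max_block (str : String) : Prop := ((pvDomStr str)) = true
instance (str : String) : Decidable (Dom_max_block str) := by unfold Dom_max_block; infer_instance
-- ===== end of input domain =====

-- B replaces A's quadratic rescanning loop by a single pass tracking the current run length and the maximum (objective: faster).

-- ===== PORT A =====
-- the inner `while(j < len(str)-1 and str[x] == str[j+1])` loop of A
def pvWhileA (s : List Char) (cx : Option Char) (j : Nat) (temp : Int) : Int :=
  if h : j + 1 < s.length then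
    if cx = PySem.List.pyGet? s ((j : Int) + 1) then
      pvWhileA s cx (j + 1) (temp + 1)
    else temp
  else temp
termination_by s.length - j

-- one iteration of A's `for x in range(len(str)-1)` loop (temp is 0 at each entry, so the state is just `max`)
def pvBodyA (s : List Char) (mx : Int) (x : Nat) : Int :=
  if PySem.List.pyGet? s (x : Int) = PySem.List.pyGet? s ((x : Int) + 1) then
    let temp := pvWhileA s (PySem.List.pyGet? s (x : Int)) x 1
    if temp > mx then temp else mx
  else mx

def max_block (str : String) : Int :=
  let s := str.toList
  let mx : Int := if s.isEmpty then 0 else 1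
  (List.range (s.length - 1)).foldl (pvBodyA s) mx

-- ===== PORT B =====
def pvBodyB (st : Option Char × Int × Int) (ch : Char) : Option Char × Int × Int :=
  let cur : Int := if some ch = st.1 then st.2.1 + 1 else 1
  let best : Int := if cur > st.2.2 then cur else st.2.2
  (some ch, cur, best)

def max_block_alt (str : String) : Int :=
  (str.toList.foldl pvBodyB (none, 0, 0)).2.2

-- ===== PRECONDITION & SPEC =====
def Spec_max_block (str : String) (out : Int) : Prop := out = max_block_alt str
instance (str : String) (out : Int) : Decidable (Spec_max_block str out) := by unfold Spec_max_block; infer_instance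

-- ===== CLAIM (what is proved, stated in full; the proofs are below) =====
def Claim_equal_max_block : Prop := ∀ (str : String), Dom_max_block str → Spec_max_block str (max_block str)

-- ===== LEMMAS AND PROOFS =====

-- length of the prefix of t consisting of the character c
def runF (c : Char) : List Char → Int
  | [] => 0
  | a :: t => if a = c then runF c t + 1 else 0

-- G s = length of the longest block of s (max over suffixes of the head-run length)
def G : List Char → Int
  | [] => 0
  | a :: t => max (1 + runF a t) (G t)

-- the quantity A's loop accumulates: max over adjacent equal pairs of the run length, floored at 1
def G' : List Char → Int
  | [] => 1
  | [_] => 1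
  | a :: b :: t => if a = b then max (2 + runF a t) (G' (b :: t)) else G' (b :: t)

lemma ite_gt_max (a b : Int) : (if a > b then a else b) = max b a := by
  split <;> omega

lemma runF_nonneg (c : Char) (t : List Char) : 0 ≤ runF c t := by
  induction t with
  | nil => simp [runF]
  | cons a t ih => simp only [runF]; split <;> omega

lemma G_pos (a : Char) (t : List Char) : 1 ≤ G (a :: t) := by
  have := runF_nonneg a t
  have h : G (a :: t) = max (1 + runF a t) (G t) := rfl
  omega

lemma pyGet?_shift (a : Char) (t : List Char) (k : Nat) :
    PySem.List.pyGet? (a :: t) ((k : Int) + 1) = PySem.List.pyGet? t (k : Int) :=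
  PySem.List.pyGet?_cons_succ a t k

lemma pvWhileA_cons (a : Char) (t : List Char) (cx : Option Char) :
    ∀ (n j : Nat) (temp : Int), t.length - j ≤ n →
      pvWhileA (a :: t) cx (j + 1) temp = pvWhileA t cx j temp := by
  intro n
  induction n with
  | zero =>
    intro j temp h
    conv_lhs => rw [pvWhileA]
    conv_rhs => rw [pvWhileA]
    have h1 : ¬ (j + 1 < t.length) := by omega
    have h2 : ¬ (j + 1 + 1 < (a :: t).length) := by simp only [List.length_cons]; omega
    rw [dif_neg h2, dif_neg h1]
  | succ n ih =>
    intro j temp h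
    conv_lhs => rw [pvWhileA]
    conv_rhs => rw [pvWhileA]
    have hget : PySem.List.pyGet? (a :: t) ((↑(j + 1) : Int) + 1) = PySem.List.pyGet? t ((↑j : Int) + 1) := by
      rw [show ((↑(j + 1) : Int) + 1) = ((↑(j + 1) : Nat) : Int) + 1 by push_cast; ring,
          pyGet?_shift a t (j + 1)]
      push_cast
      ring_nf
    by_cases hlt : j + 1 < t.length
    · have hlt2 : j + 1 + 1 < (a :: t).length := by simp only [List.length_cons]; omega
      rw [dif_pos hlt2, dif_pos hlt, hget]
      by_cases hc : cx = PySem.List.pyGet? t ((↑j : Int) + 1)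
      · rw [if_pos hc, if_pos hc]
        exact ih (j + 1) (temp + 1) (by omega)
      · rw [if_neg hc, if_neg hc]
    · have hlt2 : ¬ (j + 1 + 1 < (a :: t).length) := by simp only [List.length_cons]; omega
      rw [dif_neg hlt2, dif_neg hlt]

lemma pvWhileA_zero (c : Char) :
    ∀ (s : List Char) (temp : Int), pvWhileA s (some c) 0 temp = temp + runF c (s.drop 1) := by
  intro s
  induction s with
  | nil =>
    intro temp
    rw [pvWhileA]
    simp [runF]
  | cons a t ih =>
    intro temp
    cases t with
    | nil =>
      rw [pvWhileA]
      simp [runF]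
    | cons b t' =>
      conv_lhs => rw [pvWhileA]
      have hlen : 0 + 1 < (a :: b :: t').length := by simp [List.length_cons]
      rw [dif_pos hlen]
      have hget : PySem.List.pyGet? (a :: b :: t') ((↑(0 : Nat) : Int) + 1) = some b := by
        rw [pyGet?_shift a (b :: t') 0, Nat.cast_zero, PySem.List.pyGet?_zero_cons]
      rw [hget]
      by_cases hcb : c = b
      · rw [if_pos (by rw [hcb])]
        rw [pvWhileA_cons a (b :: t') (some c) (b :: t').length 0 (temp + 1) (by omega)]
        rw [ih (temp + 1)]
        have hr : runF c ((a :: b :: t').drop 1) = runF c t' + 1 := by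
          simp only [List.drop_one, List.tail_cons, runF, if_pos hcb.symm]
        have hr' : (b :: t').drop 1 = t' := rfl
        rw [hr, hr']
        omega
      · rw [if_neg (fun h => hcb (Option.some_inj.mp h))]
        have hr : runF c ((a :: b :: t').drop 1) = 0 := by
          simp only [List.drop_one, List.tail_cons, runF,
            if_neg (fun h : b = c => hcb h.symm)]
        rw [hr]
        omega

lemma pvBodyA_ge (s : List Char) (mx : Int) (x : Nat) : mx ≤ pvBodyA s mx x := by
  unfold pvBodyA
  split
  · rw [ite_gt_max]; omega
  · omega

lemma pvBodyA_cons (a : Char) (t : List Char) (mx : Int) (x : Nat) :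
    pvBodyA (a :: t) mx (x + 1) = pvBodyA t mx x := by
  unfold pvBodyA
  have h1 : PySem.List.pyGet? (a :: t) ((↑(x + 1) : Int)) = PySem.List.pyGet? t ((↑x : Int)) := by
    rw [show ((↑(x + 1) : Nat) : Int) = ((x : Int) + 1) by push_cast; ring, pyGet?_shift]
  have h2 : PySem.List.pyGet? (a :: t) ((↑(x + 1) : Int) + 1) = PySem.List.pyGet? t ((↑x : Int) + 1) := by
    rw [show ((↑(x + 1) : Int) + 1) = ((↑(x + 1) : Nat) : Int) + 1 by push_cast; ring,
        pyGet?_shift a t (x + 1)]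
    push_cast
    ring_nf
  have h3 : pvWhileA (a :: t) (PySem.List.pyGet? t ((↑x : Int))) (x + 1) 1
      = pvWhileA t (PySem.List.pyGet? t ((↑x : Int))) x 1 :=
    pvWhileA_cons a t _ t.length x 1 (by omega)
  rw [h1, h2, h3]

lemma G'_eq_G : ∀ (t : List Char) (a : Char), G' (a :: t) = G (a :: t) := by
  intro t
  induction t with
  | nil => intro a; simp [G', G, runF]
  | cons b t' ih =>
    intro a
    have hG : G (a :: b :: t') = max (1 + runF a (b :: t')) (G (b :: t')) := rfl
    by_cases hab : a = b
    · subst hab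
      have hL : G' (a :: a :: t') = max (2 + runF a t') (G' (a :: t')) := by
        simp [G']
      have hr : runF a (a :: t') = runF a t' + 1 := by simp [runF]
      rw [hL, ih a, hG, hr]
      omega
    · have hL : G' (a :: b :: t') = G' (b :: t') := by
        simp only [G', if_neg hab]
      have hr : runF a (b :: t') = 0 := by
        simp only [runF, if_neg (fun h : b = a => hab h.symm)]
      have hp := G_pos b t'
      rw [hL, ih b, hG, hr]
      omega

lemma foldA (s : List Char) :
    ∀ (mx : Int), 1 ≤ mx →
      (List.range (s.length - 1)).foldl (pvBodyA s) mx = max mx (G' s) := by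
  induction s with
  | nil =>
    intro mx hmx
    rw [show List.range ((List.nil (α := Char)).length - 1) = [] from rfl, List.foldl_nil,
        show G' [] = 1 from rfl]
    omega
  | cons a t ih =>
    cases t with
    | nil =>
      intro mx hmx
      rw [show List.range ([a].length - 1) = [] from rfl, List.foldl_nil,
          show G' [a] = 1 from rfl]
      omega
    | cons b t' =>
      intro mx hmx
      have hlen : (a :: b :: t').length - 1 = t'.length + 1 := by simp [List.length_cons]
      rw [hlen, List.range_succ_eq_map, List.foldl_cons, List.foldl_map]
      have hfun : (fun (m : Int) (x : Nat) => pvBodyA (a :: b :: t') m x.succ) = pvBodyA (b :: t') := by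
        funext m x
        exact pvBodyA_cons a (b :: t') m x
      have hlen' : t'.length = (b :: t').length - 1 := by simp [List.length_cons]
      rw [hfun, hlen', ih _ (le_trans hmx (pvBodyA_ge _ mx 0))]
      have hg0 : PySem.List.pyGet? (a :: b :: t') ((↑(0 : Nat) : Int)) = some a := by
        rw [Nat.cast_zero, PySem.List.pyGet?_zero_cons]
      have hg1 : PySem.List.pyGet? (a :: b :: t') ((↑(0 : Nat) : Int) + 1) = some b := by
        rw [pyGet?_shift a (b :: t') 0, Nat.cast_zero, PySem.List.pyGet?_zero_cons]
      by_cases hab : a = b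
      · have hcond : PySem.List.pyGet? (a :: b :: t') ((↑(0 : Nat) : Int))
            = PySem.List.pyGet? (a :: b :: t') ((↑(0 : Nat) : Int) + 1) := by
          rw [hg0, hg1, hab]
        have hw : pvWhileA (a :: b :: t') (PySem.List.pyGet? (a :: b :: t') ((↑(0 : Nat) : Int))) 0 1
            = 2 + runF a t' := by
          rw [hg0, pvWhileA_zero a (a :: b :: t') 1]
          have : runF a ((a :: b :: t').drop 1) = runF a t' + 1 := by
            simp only [List.drop_one, List.tail_cons, runF, if_pos hab.symm]
          rw [this]
          omega
        have hbody : pvBodyA (a :: b :: t') mx 0 = max mx (2 + runF a t') := by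
          unfold pvBodyA
          rw [if_pos hcond, hw, ite_gt_max]
        have hG' : G' (a :: b :: t') = max (2 + runF a t') (G' (b :: t')) := by
          simp only [G', if_pos hab]
        rw [hbody, hG']
        omega
      · have hcond : ¬ (PySem.List.pyGet? (a :: b :: t') ((↑(0 : Nat) : Int))
            = PySem.List.pyGet? (a :: b :: t') ((↑(0 : Nat) : Int) + 1)) := by
          rw [hg0, hg1]
          exact fun h => hab (Option.some_inj.mp h)
        have hbody : pvBodyA (a :: b :: t') mx 0 = mx := by
          unfold pvBodyA
          rw [if_neg hcond]
        have hG' : G' (a :: b :: t') = G' (b :: t') := by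
          simp only [G', if_neg hab]
        rw [hbody, hG']

lemma pvBodyB_eq (p : Option Char) (u v : Int) (ch : Char) :
    pvBodyB (p, u, v) ch
      = (some ch, (if some ch = p then u + 1 else 1), max v (if some ch = p then u + 1 else 1)) := by
  unfold pvBodyB
  dsimp only
  rw [ite_gt_max]

lemma G_nonneg (t : List Char) : 0 ≤ G t := by
  cases t with
  | nil => simp [G]
  | cons x xs => exact le_trans (by omega) (G_pos x xs)

lemma foldB (t : List Char) :
    ∀ (c : Char) (cur best : Int), 1 ≤ cur → cur ≤ best →
      (t.foldl pvBodyB (some c, cur, best)).2.2 = max best (max (cur + runF c t) (G t)) := by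
  induction t with
  | nil =>
    intro c cur best h1 h2
    simp only [List.foldl_nil, runF, G]
    omega
  | cons a t' ih =>
    intro c cur best h1 h2
    rw [List.foldl_cons, pvBodyB_eq]
    have hr := runF_nonneg a t'
    have hG := G_nonneg t'
    by_cases hac : a = c
    · rw [if_pos (by rw [hac])]
      rw [ih a (cur + 1) (max best (cur + 1)) (by omega) (by omega)]
      have h3 : runF c (a :: t') = runF c t' + 1 := by simp [runF, hac]
      have h4 : G (a :: t') = max (1 + runF a t') (G t') := rfl
      have h5 : runF a t' = runF c t' := by rw [hac]
      rw [h3, h4, h5]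
      omega
    · rw [if_neg (fun h => hac (Option.some_inj.mp h))]
      rw [ih a 1 (max best 1) (by omega) (by omega)]
      have h3 : runF c (a :: t') = 0 := by
        simp only [runF, if_neg (fun h : a = c => hac h)]
      have h4 : G (a :: t') = max (1 + runF a t') (G t') := rfl
      rw [h3, h4]
      omega

lemma A_eq_G (s : List Char) :
    (List.range (s.length - 1)).foldl (pvBodyA s) (if s.isEmpty then 0 else 1) = G s := by
  cases s with
  | nil => simp [G]
  | cons a t =>
    rw [show ((a :: t).isEmpty) = false from rfl, if_neg (by simp)]
    rw [foldA (a :: t) 1 (by omega), G'_eq_G t a]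
    have := G_pos a t
    omega

lemma B_eq_G (s : List Char) : (s.foldl pvBodyB (none, 0, 0)).2.2 = G s := by
  cases s with
  | nil => simp [G]
  | cons a t =>
    rw [List.foldl_cons, pvBodyB_eq]
    rw [if_neg (by simp), show max (0 : Int) (1 : Int) = 1 by omega]
    rw [foldB t a 1 1 (by omega) (by omega)]
    have h4 : G (a :: t) = max (1 + runF a t) (G t) := rfl
    have := runF_nonneg a t
    have := G_nonneg t
    omega

-- ===== VERDICT (by name: the statement is the Claim_ definition above) =====
theorem max_block_spec : Claim_equal_max_block := by
  intro str _
  unfold Spec_max_block max_block max_block_alt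
  rw [A_eq_G str.toList, B_eq_G str.toList]
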